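-- pv_equiv track=rewrite | github.com/wzygxr/shuati | class071_AdvancedDataStructures/debug_suffix_correct.py | compute_suffix_array
-- ===== SOURCE A (Python) =====
-- def compute_suffix_array(pattern):
--     """
--     正确计算后缀数组：suffix[i]表示模式串从位置i开始的后缀与模式串本身的最长公共后缀长度
--     """
--     m = len(pattern)
--     suffix = [0] * m
--
--     # 最后一个位置的后缀就是整个模式串，长度为m
--     suffix[m - 1] = m
--
--     # 从倒数第二个位置开始向前计算
--     for i in range(m - 2, -1, -1):
--         j = i + 1  # 从i+1位置开始比较
--         k = 0      # 匹配长度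
--
--         # 比较pattern[i:]和pattern[j:]
--         while j < m and pattern[i + k] == pattern[j]:
--             k += 1
--             j += 1
--
--         suffix[i] = k
--
--     return suffix
-- ===== SOURCE B (Python) =====
-- def compute_suffix_array(pattern):
--     # O(m) single backward pass: A's inner while-loop compares pattern[i+k] with
--     # pattern[i+1+k], i.e. it counts the run of adjacent-equal characters at i,
--     # so suffix[i] = suffix-run recurrence; last entry is m.
--     m = len(pattern)
--     if m == 0:
--         return []
--     out = [m]
--     run = 0
--     for i in range(m - 2, -1, -1):
--         run = run + 1 if pattern[i] == pattern[i + 1] else 0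
--         out.append(run)
--     out.reverse()
--     return out
-- ===== Notes on version B (the rewrite author's own statement) =====
-- stated objective: faster
-- what changed: A's quadratic inner while-loop (which in fact compares pattern[i+k] with pattern[i+1+k], counting adjacent-equal runs) is replaced by a single O(m) backward pass with the recurrence run = run+1 if pattern[i]==pattern[i+1] else 0.
import Mathlib
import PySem

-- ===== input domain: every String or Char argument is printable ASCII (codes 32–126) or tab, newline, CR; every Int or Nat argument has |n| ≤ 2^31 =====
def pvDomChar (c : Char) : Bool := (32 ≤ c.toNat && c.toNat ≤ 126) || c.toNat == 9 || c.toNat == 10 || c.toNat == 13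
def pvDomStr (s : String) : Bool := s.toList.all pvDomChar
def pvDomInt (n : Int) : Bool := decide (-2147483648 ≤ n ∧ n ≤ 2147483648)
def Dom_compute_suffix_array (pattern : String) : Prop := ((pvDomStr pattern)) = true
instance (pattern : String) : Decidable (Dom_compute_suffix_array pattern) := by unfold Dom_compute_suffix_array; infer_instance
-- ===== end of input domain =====

-- B replaces A's quadratic inner while-loop by one O(m) backward pass; Pre_ excludes
-- only the empty string, where A raises IndexError.

-- ===== PORT A =====
-- inner while loop of A: 'while j < m and pattern[i + k] == pattern[j]: k += 1; j += 1'
-- (indices i+k = j-1 < m and j < m are always in range, so getD is exact)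
def pvWhileA (p : List Char) (m i j k : Nat) : Nat :=
  if _h : j < m then
    if p.getD (i + k) ' ' == p.getD j ' ' then pvWhileA p m i (j + 1) (k + 1) else k
  else k
termination_by m - j

def compute_suffix_array (pattern : String) : List Int :=
  let p := pattern.toList
  let m := p.length
  if m = 0 then []  -- Python raises IndexError at 'suffix[m-1] = m' here; excluded by Pre_
  else
    -- suffix = [0]*m; suffix[m-1] = m
    let suffix := (List.replicate m (0 : Int)).set (m - 1) (m : Int)
    -- for i in range(m-2, -1, -1): suffix[i] = pvWhileA …  (each i in the range is ≥ 0)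
    (PySem.List.pyRange ((m : Int) - 2) (-1) (-1)).foldl
      (fun suf i => suf.set i.toNat ((pvWhileA p m i.toNat (i.toNat + 1) 0 : Nat) : Int)) suffix

-- ===== PORT B =====
-- loop of Source B: i from m-2 down to 0, 'run = run+1 if pattern[i]==pattern[i+1] else 0; out.append(run)'
-- (the counter argument is i+1; indices i and i+1 stay below m, so getD is exact)
def pvBLoop (p : List Char) : Nat → Int → List Int → List Int
  | 0, _, out => out
  | i + 1, run, out =>
      let run' : Int := if p.getD i ' ' == p.getD (i + 1) ' ' then run + 1 else 0
      pvBLoop p i run' (out ++ [run'])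

def compute_suffix_array_alt (pattern : String) : List Int :=
  let p := pattern.toList
  let m := p.length
  if m = 0 then []
  else (pvBLoop p (m - 1) 0 [(m : Int)]).reverse

-- ===== PRECONDITION & SPEC =====
-- Pre_ excludes only the empty string, where A raises IndexError (suffix[-1] on []).
def Pre_compute_suffix_array (pattern : String) : Prop := pattern ≠ ""
instance (pattern : String) : Decidable (Pre_compute_suffix_array pattern) := by
  unfold Pre_compute_suffix_array; infer_instance

def pvWitness_compute_suffix_array : String := "aabaa"

def Spec_compute_suffix_array (pattern : String) (out : List Int) : Prop :=
  out = compute_suffix_array_alt pattern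
instance (pattern : String) (out : List Int) : Decidable (Spec_compute_suffix_array pattern out) := by
  unfold Spec_compute_suffix_array; infer_instance

-- ===== CLAIM (what is proved, stated in full; the proofs are below) =====
def Claim_equal_compute_suffix_array : Prop := ∀ (pattern : String), Dom_compute_suffix_array pattern → Pre_compute_suffix_array pattern → Spec_compute_suffix_array pattern (compute_suffix_array pattern)
-- ===== LEMMAS AND PROOFS =====

-- the common value: run length of adjacent-equal characters starting at i (0 past the end)
def pvRun (p : List Char) (m i : Nat) : Nat :=
  if _h : i + 1 < m then
    if p.getD i ' ' == p.getD (i + 1) ' ' then pvRun p m (i + 1) + 1 else 0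
  else 0
termination_by m - i

theorem pvWhileA_eq_run (p : List Char) (m i : Nat) :
    ∀ k, pvWhileA p m i (i + 1 + k) k = k + pvRun p m (i + k) := by
  have H : ∀ n k, m - (i + 1 + k) ≤ n → pvWhileA p m i (i + 1 + k) k = k + pvRun p m (i + k) := by
    intro n
    induction n with
    | zero =>
      intro k hk
      have hj : ¬ (i + 1 + k < m) := by omega
      have hr : ¬ (i + k + 1 < m) := by omega
      unfold pvWhileA pvRun
      simp [hj, hr]
    | succ n ih =>
      intro k hk
      unfold pvWhileA
      by_cases hj : i + 1 + k < m
      · simp only [hj, dif_pos]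
        by_cases hc : (p.getD (i + k) ' ' == p.getD (i + 1 + k) ' ') = true
        · simp only [hc, if_pos]
          have h1 : i + 1 + k + 1 = i + 1 + (k + 1) := by omega
          rw [h1, ih (k + 1) (by omega)]
          have hr : i + k + 1 < m := by omega
          conv_rhs => rw [pvRun]
          have h2 : i + 1 + k = i + k + 1 := by omega
          rw [h2] at hc
          rw [dif_pos hr, if_pos hc]
          simp only [show i + (k + 1) = i + k + 1 from by omega]
          omega
        · simp only [hc, if_neg, Bool.not_eq_true]
          have hr : i + k + 1 < m := by omega
          conv_rhs => rw [pvRun]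
          have h2 : i + 1 + k = i + k + 1 := by omega
          rw [h2] at hc
          rw [dif_pos hr, if_neg (by simpa using hc)]
          simp
      · have hr : ¬ (i + k + 1 < m) := by omega
        unfold pvRun
        simp [hj, hr]
  exact fun k => H (m - (i + 1 + k)) k le_rfl

theorem pvBLoop_eq (p : List Char) (m : Nat) :
    ∀ n, n + 1 ≤ m → ∀ out, pvBLoop p n ((pvRun p m n : Nat) : Int) out =
      out ++ (((List.range n).map (fun j => ((pvRun p m j : Nat) : Int))).reverse) := by
  intro n
  induction n with
  | zero => intro _ out; simp [pvBLoop]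
  | succ n ih =>
    intro hn out
    have hlt : n + 1 < m := by omega
    have hrun : (if p.getD n ' ' == p.getD (n + 1) ' '
        then ((pvRun p m (n + 1) : Nat) : Int) + 1 else 0) = ((pvRun p m n : Nat) : Int) := by
      conv_rhs => rw [pvRun]
      by_cases hc : (p.getD n ' ' == p.getD (n + 1) ' ') = true
      · simp [hlt, hc]
      · simp [hlt, hc]
    show pvBLoop p (n + 1) ((pvRun p m (n + 1) : Nat) : Int) out = _
    rw [pvBLoop]
    simp only [hrun]
    rw [ih (by omega)]
    simp [List.range_succ]

theorem compute_suffix_array_alt_eq (pattern : String) (h : pattern.toList.length ≠ 0) :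
    compute_suffix_array_alt pattern =
      (List.range (pattern.toList.length - 1)).map
        (fun j => ((pvRun pattern.toList pattern.toList.length j : Nat) : Int))
      ++ [(pattern.toList.length : Int)] := by
  set p := pattern.toList with hp
  set m := p.length with hm
  unfold compute_suffix_array_alt
  simp only [← hp, ← hm, if_neg h]
  have h0 : ((pvRun p m (m - 1) : Nat) : Int) = 0 := by
    rw [pvRun]
    have : ¬ (m - 1 + 1 < m) := by omega
    simp [this]
  rw [← h0, pvBLoop_eq p m (m - 1) (by omega)]
  simp

theorem foldl_set_length (f : Nat → Int) (L : List Int) (s : List Int) :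
    (L.foldl (fun suf i => suf.set i.toNat (f i.toNat)) s).length = s.length := by
  induction L generalizing s with
  | nil => rfl
  | cons a L ih => simp [List.foldl_cons, ih]

theorem foldl_set_getElem? (f : Nat → Int) (L : List Int) (hL : ∀ x ∈ L, 0 ≤ x)
    (s : List Int) (j : Nat) (hj : j < s.length) :
    (L.foldl (fun suf i => suf.set i.toNat (f i.toNat)) s)[j]? =
      if (j : Int) ∈ L then some (f j) else s[j]? := by
  induction L generalizing s with
  | nil => simp
  | cons a L ih =>
    have ha : 0 ≤ a := hL a (by simp)
    rw [List.foldl_cons, ih (fun x hx => hL x (by simp [hx])) _ (by simpa using hj)]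
    by_cases hmem : (j : Int) ∈ L
    · simp [hmem]
    · rw [List.getElem?_set]
      by_cases he : a.toNat = j
      · have : (j : Int) = a := by omega
        simp [he, hmem, this, hj]
      · have : ¬ ((j : Int) = a) := by omega
        simp [he, hmem, this]

theorem compute_suffix_array_eq (pattern : String) (h : pattern.toList.length ≠ 0) :
    compute_suffix_array pattern =
      (List.range (pattern.toList.length - 1)).map
        (fun j => ((pvRun pattern.toList pattern.toList.length j : Nat) : Int))
      ++ [(pattern.toList.length : Int)] := by
  set p := pattern.toList with hp
  set m := p.length with hm
  unfold compute_suffix_array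
  simp only [← hp, ← hm, if_neg h]
  set f : Nat → Int := fun j => ((pvWhileA p m j (j + 1) 0 : Nat) : Int) with hf
  set L := PySem.List.pyRange ((m : Int) - 2) (-1) (-1) with hLdef
  have hmemL : ∀ x : Int, x ∈ L ↔ -1 < x ∧ x ≤ (m : Int) - 2 := by
    intro x; rw [hLdef, PySem.List.mem_pyRange_neg_one]
  have hL : ∀ x ∈ L, 0 ≤ x := by intro x hx; have := (hmemL x).1 hx; omega
  have hfr : ∀ j : Nat, f j = ((pvRun p m j : Nat) : Int) := by
    intro j
    have := pvWhileA_eq_run p m j 0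
    simp at this
    simp [hf, this]
  set s0 := (List.replicate m (0 : Int)).set (m - 1) (m : Int) with hs0
  have hs0len : s0.length = m := by simp [hs0]
  apply List.ext_getElem?
  intro j
  by_cases hjm : j < m
  · rw [foldl_set_getElem? f L hL s0 j (by omega)]
    by_cases hsmall : j < m - 1
    · have hmem : (j : Int) ∈ L := by rw [hmemL]; omega
      rw [if_pos hmem, hfr j]
      rw [List.getElem?_append_left (by simpa using hsmall)]
      simp [hsmall]
    · have hj1 : j = m - 1 := by omega
      have hmem : ¬ ((j : Int) ∈ L) := by rw [hmemL]; omega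
      rw [if_neg hmem, hs0, List.getElem?_set]
      subst hj1
      simp [hjm]
  · have h1 : (L.foldl (fun suf i => suf.set i.toNat (f i.toNat)) s0)[j]? = none := by
      rw [List.getElem?_eq_none_iff, foldl_set_length]; omega
    have h2 : ((List.range (m - 1)).map (fun j => ((pvRun p m j : Nat) : Int)) ++ [(m : Int)])[j]? = none := by
      rw [List.getElem?_eq_none_iff]; simp; omega
    rw [h1, h2]

-- ===== VERDICT (by name: the statement is the Claim_ definition above) =====
theorem compute_suffix_array_spec : Claim_equal_compute_suffix_array := by
  intro pattern _ hpre
  have h : pattern.toList.length ≠ 0 := by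
    intro h0
    exact hpre (by
      cases e : pattern.toList with
      | nil => exact String.toList_injective (by simp [e])
      | cons a l => simp [e] at h0)
  unfold Spec_compute_suffix_array
  rw [compute_suffix_array_eq pattern h, compute_suffix_array_alt_eq pattern h]
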